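-- pv_equiv track=rewrite | github.com/DesirD/fatos-pronosticv4 | predictor.py | is_top_club
-- ===== SOURCE A (Python) =====
-- TOP_CLUBS = {
--     # Premier League
--     "Manchester City", "Arsenal", "Liverpool", "Chelsea", "Manchester United",
--     "Tottenham", "Newcastle United", "Aston Villa", "West Ham", "Brighton",
--     # La Liga
--     "Real Madrid", "Barcelona", "Atletico Madrid", "Athletic Club", "Villarreal",
--     "Real Sociedad", "Real Betis", "Sevilla",
--     # Serie A
--     "Inter Milan", "Napoli", "AC Milan", "Juventus", "Atalanta", "Lazio", "Roma", "Fiorentina",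
--     "Internazionale",
--     # Bundesliga
--     "Bayern Munich", "Bayer Leverkusen", "Borussia Dortmund", "RB Leipzig",
--     "Eintracht Frankfurt", "Stuttgart", "Wolfsburg",
--     # Ligue 1
--     "Paris Saint-Germain", "Monaco", "Marseille", "Lille", "Lyon", "Nice", "Rennes",
--     # Champions League + autres
--     "Porto", "Benfica", "Sporting CP", "Ajax", "PSV Eindhoven", "Feyenoord",
--     "Celtic", "Rangers", "Galatasaray", "Fenerbahce", "Besiktas",
--     "Shakhtar Donetsk", "Dynamo Kyiv",
--     "Al Hilal", "Al Nassr", "Al Ahli", "Al Ittihad",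
--     "Club America", "Cruz Azul", "Chivas", "Tigres UANL",
--     "Flamengo", "Palmeiras", "Atletico Mineiro", "Sao Paulo", "Corinthians",
--     "Red Bull New York", "LA Galaxy", "Inter Miami", "Seattle Sounders",
-- }
--
-- def is_top_club(name):
--     """Check if a team is a top club (fuzzy match)."""
--     if name in TOP_CLUBS:
--         return True
--     name_lower = name.lower()
--     for club in TOP_CLUBS:
--         if club.lower() in name_lower or name_lower in club.lower():
--             return True
--         # Match on significant words
--         words = [w for w in club.split() if len(w) > 4]
--         if any(w.lower() in name_lower for w in words):
--             return True
--     return False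
-- ===== SOURCE B (Python) =====
-- TOP_CLUBS = {
--     # Premier League
--     "Manchester City", "Arsenal", "Liverpool", "Chelsea", "Manchester United",
--     "Tottenham", "Newcastle United", "Aston Villa", "West Ham", "Brighton",
--     # La Liga
--     "Real Madrid", "Barcelona", "Atletico Madrid", "Athletic Club", "Villarreal",
--     "Real Sociedad", "Real Betis", "Sevilla",
--     # Serie A
--     "Inter Milan", "Napoli", "AC Milan", "Juventus", "Atalanta", "Lazio", "Roma", "Fiorentina",
--     "Internazionale",
--     # Bundesliga
--     "Bayern Munich", "Bayer Leverkusen", "Borussia Dortmund", "RB Leipzig",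
--     "Eintracht Frankfurt", "Stuttgart", "Wolfsburg",
--     # Ligue 1
--     "Paris Saint-Germain", "Monaco", "Marseille", "Lille", "Lyon", "Nice", "Rennes",
--     # Champions League + autres
--     "Porto", "Benfica", "Sporting CP", "Ajax", "PSV Eindhoven", "Feyenoord",
--     "Celtic", "Rangers", "Galatasaray", "Fenerbahce", "Besiktas",
--     "Shakhtar Donetsk", "Dynamo Kyiv",
--     "Al Hilal", "Al Nassr", "Al Ahli", "Al Ittihad",
--     "Club America", "Cruz Azul", "Chivas", "Tigres UANL",
--     "Flamengo", "Palmeiras", "Atletico Mineiro", "Sao Paulo", "Corinthians",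
--     "Red Bull New York", "LA Galaxy", "Inter Miami", "Seattle Sounders",
-- }
--
-- LOWER_CLUBS = {c.lower() for c in TOP_CLUBS}
--
-- # Flat pattern index, built once: each club contributes its significant (len > 4) words,
-- # lowercased; a club with NO significant word contributes its whole lowercase name instead.
-- # For every other club the whole-name-in-text test is subsumed by one of its words
-- # (each word is a substring of the club name), so it is dropped from the index.
-- PATTERNS = set()
-- for _c in TOP_CLUBS:
--     _ws = [w.lower() for w in _c.split() if len(w) > 4]
--     PATTERNS.update(_ws if _ws else [_c.lower()])
--
-- # bucket the pattern index by first character, so the position scan does one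
-- # dict lookup per text position (every pattern is nonempty)
-- FIRST = {}
-- for _p in PATTERNS:
--     FIRST.setdefault(_p[0], []).append(_p)
--
-- def is_top_club(name):
--     """Check if a team is a top club (fuzzy match)."""
--     if name in TOP_CLUBS:
--         return True
--     nl = name.lower()
--     if any(nl in c for c in LOWER_CLUBS):
--         return True
--     # position scan: walk the text once, matching the bucketed pattern index at each offset
--     for j in range(len(nl)):
--         if any(nl.startswith(p, j) for p in FIRST.get(nl[j], ())):
--             return True
--     return False
-- ===== Notes on version B (the rewrite author's own statement) =====
-- stated objective: alternative
-- what changed: A loops over clubs pairing two substring tests and a word test per club; B precomputes a reduced flat pattern index (each club's significant words, or its whole lowercase name only when it has none, justified by substring subsumption), buckets it by first character into a dict, and matches by a single position scan over the text with one bucket lookup per offset, keeping only the name-in-club direction as a set scan.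
import Mathlib
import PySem

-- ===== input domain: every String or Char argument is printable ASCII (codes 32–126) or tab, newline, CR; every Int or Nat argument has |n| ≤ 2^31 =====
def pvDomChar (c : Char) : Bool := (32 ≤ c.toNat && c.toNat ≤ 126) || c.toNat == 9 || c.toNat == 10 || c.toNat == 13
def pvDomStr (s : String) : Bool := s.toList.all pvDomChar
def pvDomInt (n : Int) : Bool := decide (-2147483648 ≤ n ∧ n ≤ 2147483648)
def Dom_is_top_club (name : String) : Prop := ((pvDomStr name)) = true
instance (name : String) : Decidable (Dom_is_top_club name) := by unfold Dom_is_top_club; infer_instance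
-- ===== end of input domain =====

-- B replaces A's per-club loop of paired substring/word tests by a reduced flat pattern
-- index built once (significant words, or the whole lowercase club name only for clubs
-- without one) matched by an explicit position scan over the text (objective: alternative).

-- ===== PORT A =====
-- the module-level set literal TOP_CLUBS (a Python set: distinct elements, insertion order)
def pvClubLits : List String :=
  ["Manchester City", "Arsenal", "Liverpool", "Chelsea", "Manchester United",
   "Tottenham", "Newcastle United", "Aston Villa", "West Ham", "Brighton",
   "Real Madrid", "Barcelona", "Atletico Madrid", "Athletic Club", "Villarreal",
   "Real Sociedad", "Real Betis", "Sevilla",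
   "Inter Milan", "Napoli", "AC Milan", "Juventus", "Atalanta", "Lazio", "Roma", "Fiorentina",
   "Internazionale",
   "Bayern Munich", "Bayer Leverkusen", "Borussia Dortmund", "RB Leipzig",
   "Eintracht Frankfurt", "Stuttgart", "Wolfsburg",
   "Paris Saint-Germain", "Monaco", "Marseille", "Lille", "Lyon", "Nice", "Rennes",
   "Porto", "Benfica", "Sporting CP", "Ajax", "PSV Eindhoven", "Feyenoord",
   "Celtic", "Rangers", "Galatasaray", "Fenerbahce", "Besiktas",
   "Shakhtar Donetsk", "Dynamo Kyiv",
   "Al Hilal", "Al Nassr", "Al Ahli", "Al Ittihad",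
   "Club America", "Cruz Azul", "Chivas", "Tigres UANL",
   "Flamengo", "Palmeiras", "Atletico Mineiro", "Sao Paulo", "Corinthians",
   "Red Bull New York", "LA Galaxy", "Inter Miami", "Seattle Sounders"]

def TOP_CLUBS : PySem.Set String := PySem.Set.ofList pvClubLits

-- the 'for club in TOP_CLUBS:' loop with its early returns
def is_top_club_loop (name_lower : String) : List String → Bool
  | [] => false
  | club :: rest =>
    if PySem.Str.isIn (PySem.Str.lower club) name_lower
        || PySem.Str.isIn name_lower (PySem.Str.lower club) then true
    else
      let words := (PySem.Str.split₀ club).filter (fun w => decide (4 < PySem.Str.len w))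
      if words.any (fun w => PySem.Str.isIn (PySem.Str.lower w) name_lower) then true
      else is_top_club_loop name_lower rest

def is_top_club (name : String) : Bool :=
  if PySem.Set.contains TOP_CLUBS name then true
  else is_top_club_loop (PySem.Str.lower name) TOP_CLUBS

-- ===== PORT B =====
def LOWER_CLUBS : PySem.Set String :=
  PySem.Set.ofList ((TOP_CLUBS : List String).map PySem.Str.lower)

-- _ws = [w.lower() for w in c.split() if len(w) > 4]
def pvSig (c : String) : List String :=
  ((PySem.Str.split₀ c).filter (fun w => decide (4 < PySem.Str.len w))).map PySem.Str.lower

-- the module-level build loop: PATTERNS.update(_ws if _ws else [_c.lower()])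
def PATTERNS : PySem.Set String :=
  (TOP_CLUBS : List String).foldl
    (fun acc c => PySem.Set.update acc (if (pvSig c).isEmpty then [PySem.Str.lower c] else pvSig c))
    PySem.Set.empty

-- the pattern index bucketed by first character: FIRST.setdefault(_p[0], []).append(_p)
-- (_p[0]: every element of PATTERNS is a nonempty string, so the .getD ' ' default never fires)
def pvHead (p : String) : Char := (PySem.Str.pyGet? p 0).getD ' '

def FIRST : PySem.Dict Char (List String) :=
  (PATTERNS : List String).foldl
    (fun d p => PySem.Dict.modify d (pvHead p) [] (fun l => l ++ [p])) PySem.Dict.empty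

-- the 'for j in range(len(nl)):' position scan with its early return;
-- nl[j] is total here (0 <= j < len nl), and nl.startswith(p, j) is exactly
-- startswith applied to the slice nl[j:] for such j
def pvScan (nl : String) : List Int → Bool
  | [] => false
  | j :: rest =>
    if (PySem.Dict.getD FIRST ((PySem.Str.pyGet? nl j).getD ' ') []).any
        (fun p => PySem.Str.startswith (PySem.Str.slice nl (some j) none) p) then true
    else pvScan nl rest

def is_top_club_alt (name : String) : Bool :=
  if PySem.Set.contains TOP_CLUBS name then true
  else
    let nl := PySem.Str.lower name
    if (LOWER_CLUBS : List String).any (fun c => PySem.Str.isIn nl c) then true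
    else pvScan nl (PySem.List.pyRange 0 (PySem.Str.len nl))

-- ===== PRECONDITION & SPEC =====
def Spec_is_top_club (name : String) (out : Bool) : Prop := out = is_top_club_alt name
instance (name : String) (out : Bool) : Decidable (Spec_is_top_club name out) := by unfold Spec_is_top_club; infer_instance

-- ===== CLAIM (what is proved, stated in full; the proofs are below) =====
def Claim_equal_is_top_club : Prop := ∀ (name : String), Dom_is_top_club name → Spec_is_top_club name (is_top_club name)

-- ===== LEMMAS AND PROOFS =====

-- the two per-club tests of A's loop body, named for the proofs
def pvSub (nl c : String) : Bool :=
  PySem.Str.isIn (PySem.Str.lower c) nl || PySem.Str.isIn nl (PySem.Str.lower c)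

def pvWord (nl c : String) : Bool :=
  ((PySem.Str.split₀ c).filter (fun w => decide (4 < PySem.Str.len w))).any
    (fun w => PySem.Str.isIn (PySem.Str.lower w) nl)

-- A's early-return loop is one any-scan of the disjunction of its two tests
theorem pv_loop_eq_any (nl : String) (cs : List String) :
    is_top_club_loop nl cs = cs.any (fun c => pvSub nl c || pvWord nl c) := by
  induction cs with
  | nil => rfl
  | cons c rest ih =>
    show (if pvSub nl c = true then true
          else if pvWord nl c = true then true else is_top_club_loop nl rest) = _
    cases hs : pvSub nl c <;> cases hw : pvWord nl c <;>
      simp [List.any_cons, hs, hw, ih]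

-- B's early-return position scan is one any-scan over the positions
theorem pv_scan_eq_any (nl : String) (js : List Int) :
    pvScan nl js = js.any (fun j =>
      (PySem.Dict.getD FIRST ((PySem.Str.pyGet? nl j).getD ' ') []).any
        (fun p => PySem.Str.startswith (PySem.Str.slice nl (some j) none) p)) := by
  induction js with
  | nil => rfl
  | cons j rest ih =>
    show (if _ then true else pvScan nl rest) = _
    split_ifs with h
    · simp only [List.any_cons, h, Bool.true_or]
    · rw [Bool.not_eq_true] at h
      simp only [List.any_cons, h, Bool.false_or, ih]

-- membership in set.update = membership in the set or the added iterable
theorem pv_mem_update (s : PySem.Set String) (xs : List String) (x : String) :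
    x ∈ PySem.Set.update s xs ↔ x ∈ s ∨ x ∈ xs := by
  show x ∈ xs.foldl PySem.Set.add s ↔ _
  induction xs generalizing s with
  | nil => simp
  | cons y ys ih =>
    simp only [List.foldl_cons, ih, PySem.Set.mem_add, List.mem_cons]
    tauto

-- membership in B's build loop = membership in some club's contribution
theorem pv_mem_foldl_update (l : List String) (f : String → List String)
    (s : PySem.Set String) (x : String) :
    x ∈ l.foldl (fun acc c => PySem.Set.update acc (f c)) s ↔ x ∈ s ∨ ∃ c ∈ l, x ∈ f c := by
  induction l generalizing s with
  | nil => simp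
  | cons c cs ih =>
    simp only [List.foldl_cons, ih, pv_mem_update, List.mem_cons]
    constructor
    · rintro ((h | h) | ⟨d, hd, hx⟩)
      · exact Or.inl h
      · exact Or.inr ⟨c, Or.inl rfl, h⟩
      · exact Or.inr ⟨d, Or.inr hd, hx⟩
    · rintro (h | ⟨d, rfl | hd, hx⟩)
      · exact Or.inl (Or.inl h)
      · exact Or.inl (Or.inr hx)
      · exact Or.inr ⟨d, hd, hx⟩

theorem pv_mem_PATTERNS (p : String) :
    p ∈ (PATTERNS : List String) ↔ ∃ c ∈ (TOP_CLUBS : List String),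
      p ∈ (if (pvSig c).isEmpty then [PySem.Str.lower c] else pvSig c) := by
  unfold PATTERNS
  rw [pv_mem_foldl_update]
  simp [PySem.Set.empty]

-- every significant lowered word of a club is an infix of the lowered club name
set_option maxRecDepth 100000 in
theorem pv_clubFact : ∀ c ∈ (TOP_CLUBS : List String),
    ∀ w ∈ pvSig c, w.toList <:+: (PySem.Str.lower c).toList := by decide

-- every pattern is a nonempty string
set_option maxRecDepth 100000 in
theorem pv_nonempty : ∀ p ∈ (PATTERNS : List String), p.toList ≠ [] := by decide

theorem pv_pvHead (p : String) (h : p.toList ≠ []) : pvHead p = p.toList.head h := by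
  unfold pvHead
  have h0 : 0 < p.toList.length := List.length_pos_iff.2 h
  rw [show (0:Int) = ((0:Nat):Int) from rfl, PySem.Str.pyGet?_natCast,
      List.getElem?_eq_getElem h0, Option.getD_some, List.head_eq_getElem]

-- the buckets of FIRST hold exactly the patterns with that first character
set_option maxRecDepth 100000 in
theorem pv_mem_FIRST (c : Char) (p : String) :
    p ∈ PySem.Dict.getD FIRST c [] ↔ p ∈ (PATTERNS : List String) ∧ pvHead p = c := by
  unfold FIRST
  rw [show ((PATTERNS : List String).foldl
        (fun d p => PySem.Dict.modify d (pvHead p) [] (fun l => l ++ [p])) PySem.Dict.empty)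
      = (((PATTERNS : List String).map (fun p => (pvHead p, p))).foldl
          (fun d q => PySem.Dict.modify d q.1 [] (fun l => l ++ [q.2])) PySem.Dict.empty)
    from (List.foldl_map (f := fun p => (pvHead p, p))
      (g := fun d q => PySem.Dict.modify d q.1 [] (fun l => l ++ [q.2]))
      (l := (PATTERNS : List String)) (init := PySem.Dict.empty)).symm]
  rw [PySem.Dict.getD_foldl_modify_append]
  rw [show (PySem.Dict.empty : PySem.Dict Char (List String)).getD c [] = [] from rfl]
  rw [List.nil_append]
  simp only [List.mem_map, List.mem_filter, List.mem_map]
  constructor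
  · rintro ⟨⟨h1, h2⟩, ⟨⟨q, hq, hqe⟩, hc⟩, rfl⟩
    obtain ⟨rfl, rfl⟩ := Prod.mk.injEq .. ▸ hqe
    exact ⟨hq, by simpa using hc⟩
  · rintro ⟨hp, hc⟩
    exact ⟨(pvHead p, p), ⟨⟨p, hp, rfl⟩, by simpa using hc⟩, rfl⟩

-- the position scan over range(len(nl)) decides 'some pattern occurs in nl'
theorem pv_scan_eq_isIn (nl : String) :
    pvScan nl (PySem.List.pyRange 0 (PySem.Str.len nl)) =
      (PATTERNS : List String).any (fun p => PySem.Str.isIn p nl) := by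
  rw [pv_scan_eq_any, Bool.eq_iff_iff]
  simp only [List.any_eq_true]
  constructor
  · rintro ⟨j, hj, p, hp, hsw⟩
    refine ⟨p, ((pv_mem_FIRST _ p).1 hp).1, ?_⟩
    rw [PySem.List.mem_pyRange_one] at hj
    rw [PySem.Str.startswith_eq, PySem.Chars.startswith_iff, PySem.Str.toList_slice,
        PySem.Chars.slice_eq_listSlice, PySem.List.slice_from _ hj.1] at hsw
    rw [PySem.Str.isIn_eq, ← PySem.Chars.exists_prefix_drop_iff_isIn]
    exact ⟨j.toNat, hsw⟩
  · rintro ⟨p, hp, hin⟩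
    rw [PySem.Str.isIn_eq, ← PySem.Chars.exists_prefix_drop_iff_isIn] at hin
    obtain ⟨j, hpre⟩ := hin
    have hne : p.toList ≠ [] := pv_nonempty p hp
    have hjlt : j < nl.toList.length := by
      by_contra hge
      rw [List.drop_eq_nil_of_le (le_of_not_gt hge), List.prefix_nil] at hpre
      exact hne hpre
    have h0 : 0 < p.toList.length := List.length_pos_iff.2 hne
    refine ⟨((j : Nat) : Int), ?_, p, ?_, ?_⟩
    · rw [PySem.List.mem_pyRange_one, PySem.Str.len_eq]
      exact ⟨Int.natCast_nonneg _, by exact_mod_cast hjlt⟩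
    · refine (pv_mem_FIRST _ p).2 ⟨hp, ?_⟩
      rw [PySem.Str.pyGet?_natCast, List.getElem?_eq_getElem hjlt, Option.getD_some,
          pv_pvHead p hne, List.head_eq_getElem]
      have := hpre.getElem h0
      rw [List.getElem_drop] at this
      simpa using this
    · rw [PySem.Str.startswith_eq, PySem.Chars.startswith_iff, PySem.Str.toList_slice,
          PySem.Chars.slice_eq_listSlice, PySem.List.slice_from _ (Int.natCast_nonneg _),
          Int.toNat_natCast]
      exact hpre

-- the heart of the equivalence: A's per-club disjunction equals B's two flat scans
theorem pv_core (nl : String) :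
    (TOP_CLUBS : List String).any (fun c => pvSub nl c || pvWord nl c)
    = ((LOWER_CLUBS : List String).any (fun c => PySem.Str.isIn nl c)
       || (PATTERNS : List String).any (fun p => PySem.Str.isIn p nl)) := by
  rw [Bool.eq_iff_iff]
  simp only [Bool.or_eq_true, List.any_eq_true]
  constructor
  · rintro ⟨c, hc, hcc⟩
    rcases hcc with hsub | hword
    · unfold pvSub at hsub
      rw [Bool.or_eq_true] at hsub
      rcases hsub with hin | hrev
      · -- the lowered club occurs in nl: subsumed by one of its patterns
        right
        by_cases hsg : (pvSig c).isEmpty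
        · exact ⟨PySem.Str.lower c, (pv_mem_PATTERNS _).2 ⟨c, hc, by simp [hsg]⟩, hin⟩
        · obtain ⟨w, hw⟩ := List.exists_mem_of_ne_nil (pvSig c)
            (by simpa [List.isEmpty_iff] using hsg)
          refine ⟨w, (pv_mem_PATTERNS _).2 ⟨c, hc, by simp [hsg, hw]⟩, ?_⟩
          rw [PySem.Str.isIn_iff_infix] at hin ⊢
          exact (pv_clubFact c hc w hw).trans hin
      · -- nl occurs in the lowered club
        refine Or.inl ⟨PySem.Str.lower c, ?_, hrev⟩
        unfold LOWER_CLUBS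
        exact (PySem.Set.mem_ofList _ _).2 (List.mem_map_of_mem hc)
    · -- a significant word occurs in nl
      unfold pvWord at hword
      rw [List.any_eq_true] at hword
      obtain ⟨w, hwmem, hwin⟩ := hword
      right
      have hsigmem : PySem.Str.lower w ∈ pvSig c := List.mem_map_of_mem hwmem
      have hne : ¬ (pvSig c).isEmpty := by
        rw [List.isEmpty_iff]
        exact List.ne_nil_of_mem hsigmem
      exact ⟨PySem.Str.lower w, (pv_mem_PATTERNS _).2 ⟨c, hc, by simp [hne, hsigmem]⟩, hwin⟩
  · rintro (⟨lc, hlc, hin⟩ | ⟨p, hp, hin⟩)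
    · -- nl in some lowered club
      unfold LOWER_CLUBS at hlc
      rw [PySem.Set.mem_ofList, List.mem_map] at hlc
      obtain ⟨c, hc, rfl⟩ := hlc
      exact ⟨c, hc, Or.inl (by unfold pvSub; rw [Bool.or_eq_true]; exact Or.inr hin)⟩
    · -- some pattern in nl
      obtain ⟨c, hc, hpc⟩ := (pv_mem_PATTERNS p).1 hp
      refine ⟨c, hc, ?_⟩
      by_cases hsg : (pvSig c).isEmpty
      · rw [if_pos hsg, List.mem_singleton] at hpc
        subst hpc
        exact Or.inl (by unfold pvSub; rw [Bool.or_eq_true]; exact Or.inl hin)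
      · rw [if_neg hsg] at hpc
        unfold pvSig at hpc
        rw [List.mem_map] at hpc
        obtain ⟨w, hw, rfl⟩ := hpc
        refine Or.inr ?_
        unfold pvWord
        rw [List.any_eq_true]
        exact ⟨w, hw, hin⟩

-- ===== VERDICT (by name: the statement is the Claim_ definition above) =====
set_option maxRecDepth 8192 in
set_option maxHeartbeats 1000000 in
theorem is_top_club_spec : Claim_equal_is_top_club := by
  intro name _
  unfold Spec_is_top_club is_top_club is_top_club_alt
  cases hm : PySem.Set.contains TOP_CLUBS name with
  | true => rfl
  | false =>
    simp only [Bool.false_eq_true, if_false]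
    rw [pv_loop_eq_any, pv_core]
    show _ = (if (List.any LOWER_CLUBS fun c => PySem.Str.isIn (PySem.Str.lower name) c) = true
              then true
              else pvScan (PySem.Str.lower name)
                (PySem.List.pyRange 0 (PySem.Str.len (PySem.Str.lower name))))
    rw [pv_scan_eq_isIn]
    cases h : (LOWER_CLUBS : List String).any (fun c => PySem.Str.isIn (PySem.Str.lower name) c)
    · simp only [Bool.false_eq_true, if_false, Bool.false_or]
    · simp only [if_true, Bool.true_or]
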